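-- pv_equiv track=rewrite | github.com/php1aqm/php1aqm | src/f_c.py | pinyin2chinese
-- ===== SOURCE A (Python) =====
-- def pinyin2chinese(text):
--     tone_map = {
--         'a1': 'ā', 'a2': 'á', 'a3': 'ǎ', 'a4': 'à',
--         'e1': 'ē', 'e2': 'é', 'e3': 'ě', 'e4': 'è',
--         'i1': 'ī', 'i2': 'í', 'i3': 'ǐ', 'i4': 'ì',
--         'o1': 'ō', 'o4': 'ó', 'o3': 'ǒ', 'o2': 'ò',
--         'u1': 'ū', 'u2': 'ú', 'u3': 'ǔ', 'u4': 'ù',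
--         'v1': 'ǖ', 'v2': 'ǘ', 'v3': 'ǚ', 'v4': 'ǜ',
--     }
--     for tone in tone_map:
--         text = text.replace(tone, tone_map[tone])
--     return text
-- ===== SOURCE B (Python) =====
-- def pinyin2chinese(text):
--     accents = {
--         'a': 'āáǎà', 'e': 'ēéěè', 'i': 'īíǐì',
--         'o': 'ōòǒó', 'u': 'ūúǔù', 'v': 'ǖǘǚǜ',
--     }
--     pieces = []
--     i = 0
--     n = len(text)
--     while i < n:
--         c = text[i]
--         if c in accents and i + 1 < n and text[i + 1] in '1234':
--             pieces.append(accents[c][int(text[i + 1]) - 1])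
--             i += 2
--         else:
--             pieces.append(c)
--             i += 1
--     return ''.join(pieces)
-- ===== Notes on version B (the rewrite author's own statement) =====
-- stated objective: alternative
-- what changed: Replaces A's 24 sequential full-text str.replace passes by one left-to-right scan that matches a vowel+tone-digit pair at each position and emits the accented character directly.
import Mathlib
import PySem

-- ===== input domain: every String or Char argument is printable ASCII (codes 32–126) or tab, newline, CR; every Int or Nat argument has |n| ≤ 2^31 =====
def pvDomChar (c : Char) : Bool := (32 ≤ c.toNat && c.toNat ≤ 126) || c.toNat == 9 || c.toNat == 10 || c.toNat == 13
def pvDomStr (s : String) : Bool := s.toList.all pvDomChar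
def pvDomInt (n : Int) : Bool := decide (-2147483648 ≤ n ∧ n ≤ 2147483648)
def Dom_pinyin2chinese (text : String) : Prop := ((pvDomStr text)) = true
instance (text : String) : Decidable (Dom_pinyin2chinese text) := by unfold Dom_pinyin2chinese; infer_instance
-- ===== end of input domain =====

-- B replaces A's 24 sequential full-text replace passes by one left-to-right scan
-- that emits the accented character for each vowel+tone-digit pair (alternative decomposition).


-- ===== PORT A =====
-- the tone_map dict of A, in insertion order
def pvToneTable : List (String × String) :=
  [("a1","ā"), ("a2","á"), ("a3","ǎ"), ("a4","à"),
   ("e1","ē"), ("e2","é"), ("e3","ě"), ("e4","è"),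
   ("i1","ī"), ("i2","í"), ("i3","ǐ"), ("i4","ì"),
   ("o1","ō"), ("o4","ó"), ("o3","ǒ"), ("o2","ò"),
   ("u1","ū"), ("u2","ú"), ("u3","ǔ"), ("u4","ù"),
   ("v1","ǖ"), ("v2","ǘ"), ("v3","ǚ"), ("v4","ǜ")]

-- 'for tone in tone_map: text = text.replace(tone, tone_map[tone])'
def pinyin2chinese (text : String) : String :=
  pvToneTable.foldl (fun t p => PySem.Str.replace t p.1 p.2) text

-- ===== PORT B =====
def pvVowel (c : Char) : Bool := c ∈ ['a','e','i','o','u','v']      -- "c in accents" (key test)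
def pvToneDigit (d : Char) : Bool := d ∈ ['1','2','3','4']          -- "text[i+1] in '1234'"

-- accents[c]: the four accented forms of vowel c, for tones 1..4
def pvAccents (c : Char) : List Char :=
  match c with
  | 'a' => ['ā','á','ǎ','à'] | 'e' => ['ē','é','ě','è'] | 'i' => ['ī','í','ǐ','ì']
  | 'o' => ['ō','ò','ǒ','ó'] | 'u' => ['ū','ú','ǔ','ù'] | 'v' => ['ǖ','ǘ','ǚ','ǜ']
  | _ => []

-- accents[c][int(text[i+1]) - 1]; only applied under the vowel/digit guard, where it is exact
def pvToneChar (c d : Char) : Char := (pvAccents c).getD (d.toNat - 49) c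

-- Source B's index loop, as the obvious structural recursion over the characters
def pvScan : List Char → List Char
  | [] => []
  | c :: t =>
    if pvVowel c then
      match t with
      | d :: t' => if pvToneDigit d then pvToneChar c d :: pvScan t' else c :: pvScan (d :: t')
      | [] => [c]
    else c :: pvScan t

def pinyin2chinese_alt (text : String) : String := String.ofList (pvScan text.toList)

-- ===== PRECONDITION & SPEC =====
def Spec_pinyin2chinese (text : String) (out : String) : Prop := out = pinyin2chinese_alt text
instance (text : String) (out : String) : Decidable (Spec_pinyin2chinese text out) := by unfold Spec_pinyin2chinese; infer_instance

-- ===== CLAIM (what is proved, stated in full; the proofs are below) =====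
def Claim_equal_pinyin2chinese : Prop := ∀ (text : String), Dom_pinyin2chinese text → Spec_pinyin2chinese text (pinyin2chinese text)

-- ===== LEMMAS AND PROOFS =====

-- character-level model of str.replace for a 2-char pattern [v,d] and a 1-char replacement [z]
def pvRep (v d z : Char) : List Char → List Char
  | [] => []
  | [c] => [c]
  | c :: c' :: t => if c = v ∧ c' = d then z :: pvRep v d z t else c :: pvRep v d z (c' :: t)

-- the 24 (vowel, digit, accented) triples of the tone map, in the same order
def pvP : List (Char × Char × Char) :=
  [('a','1','ā'), ('a','2','á'), ('a','3','ǎ'), ('a','4','à'),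
   ('e','1','ē'), ('e','2','é'), ('e','3','ě'), ('e','4','è'),
   ('i','1','ī'), ('i','2','í'), ('i','3','ǐ'), ('i','4','ì'),
   ('o','1','ō'), ('o','4','ó'), ('o','3','ǒ'), ('o','2','ò'),
   ('u','1','ū'), ('u','2','ú'), ('u','3','ǔ'), ('u','4','ù'),
   ('v','1','ǖ'), ('v','2','ǘ'), ('v','3','ǚ'), ('v','4','ǜ')]

def pvFold (Q : List (Char × Char × Char)) (l : List Char) : List Char :=
  Q.foldl (fun s p => pvRep p.1 p.2.1 p.2.2 s) l

def pvGood (Q : List (Char × Char × Char)) : Prop :=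
  ∀ p ∈ Q, pvVowel p.1 = true ∧ pvToneDigit p.2.1 = true ∧
           pvVowel p.2.2 = false ∧ pvToneDigit p.2.2 = false

lemma pvRep_go (v d z : Char) :
    ∀ (fuel : Nat) (l acc : List Char), l.length ≤ fuel →
      PySem.Chars.replace.go [v,d] [z] fuel l acc = acc.reverse ++ pvRep v d z l := by
  intro fuel
  induction fuel with
  | zero => intro l acc h; cases l with
    | nil => simp [PySem.Chars.replace.go, pvRep]
    | cons c t => simp at h
  | succ n ih =>
    intro l acc h
    cases l with
    | nil => simp [PySem.Chars.replace.go, pvRep]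
    | cons c t =>
      cases t with
      | nil =>
        have : ([v,d].isPrefixOf [c]) = false := by
          simp [List.isPrefixOf]
        simp [PySem.Chars.replace.go, this, pvRep]
        rw [ih [] (c :: acc) (by simp)]
        simp [pvRep]
      | cons c' t' =>
        by_cases hm : c = v ∧ c' = d
        · obtain ⟨rfl, rfl⟩ := hm
          have hp : ([c, c'].isPrefixOf (c :: c' :: t')) = true := by
            simp [List.isPrefixOf]
          simp only [PySem.Chars.replace.go, hp, if_true]
          rw [show List.drop ([c, c'].length) (c :: c' :: t') = t' from rfl,
            show ([z].reverse ++ acc) = z :: acc from rfl]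
          rw [ih t' (z :: acc) (by simp at h ⊢; omega)]
          simp [pvRep]
        · have hp : ([v,d].isPrefixOf (c :: c' :: t')) = false := by
            simp [List.isPrefixOf]
            intro hv hd; exact hm ⟨hv.symm, hd.symm⟩
          simp only [PySem.Chars.replace.go, hp, Bool.false_eq_true, if_false]
          rw [ih (c' :: t') (c :: acc) (by simp at h ⊢; omega)]
          simp [pvRep, hm]

lemma pvReplace_eq (v d z : Char) (l : List Char) :
    PySem.Chars.replace l [v,d] [z] = pvRep v d z l := by
  simp only [PySem.Chars.replace, List.isEmpty]
  rw [pvRep_go v d z l.length l [] (le_refl _)]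
  simp

lemma pvRep_nomatch (v d z c : Char) (t : List Char)
    (h : ¬ (c = v ∧ t.head? = some d)) :
    pvRep v d z (c :: t) = c :: pvRep v d z t := by
  cases t with
  | nil => simp [pvRep]
  | cons c' t' =>
    simp only [pvRep, List.head?] at h ⊢
    rw [if_neg]
    intro ⟨h1, h2⟩; exact h ⟨h1, by simp [h2]⟩

lemma pvRep_match (v d z : Char) (t : List Char) :
    pvRep v d z (v :: d :: t) = z :: pvRep v d z t := by
  simp [pvRep]

lemma pvRep_head (v d z : Char) (l : List Char) :
    (pvRep v d z l).head? = l.head? ∨ (pvRep v d z l).head? = some z := by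
  cases l with
  | nil => left; rfl
  | cons c t =>
    cases t with
    | nil => left; rfl
    | cons c' t' =>
      simp only [pvRep]
      split
      · right; rfl
      · left; rfl

-- no pattern's first character is c ⇒ c stays in front and the passes act on the tail
lemma pvFold_c1 (c : Char) :
    ∀ (Q : List (Char × Char × Char)), (∀ p ∈ Q, p.1 ≠ c) →
      ∀ s, pvFold Q (c :: s) = c :: pvFold Q s := by
  intro Q
  induction Q with
  | nil => intro _ s; rfl
  | cons p Q ih =>
    intro h s
    have h1 : p.1 ≠ c := h p (by simp)
    have : pvRep p.1 p.2.1 p.2.2 (c :: s) = c :: pvRep p.1 p.2.1 p.2.2 s := by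
      apply pvRep_nomatch
      intro ⟨hc, _⟩; exact h1 hc.symm
    simp only [pvFold, List.foldl_cons, this]
    exact ih (fun q hq => h q (by simp [hq])) (pvRep p.1 p.2.1 p.2.2 s)

-- the tail never starts with a tone digit ⇒ the head is never consumed
lemma pvFold_c3 (c : Char) :
    ∀ (Q : List (Char × Char × Char)), pvGood Q →
      ∀ s, (∀ x, s.head? = some x → pvToneDigit x = false) →
        pvFold Q (c :: s) = c :: pvFold Q s := by
  intro Q
  induction Q with
  | nil => intro _ s _; rfl
  | cons p Q ih =>
    intro hg s hs
    have hgp := hg p (by simp)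
    have hstep : pvRep p.1 p.2.1 p.2.2 (c :: s) = c :: pvRep p.1 p.2.1 p.2.2 s := by
      apply pvRep_nomatch
      intro ⟨_, hh⟩
      have := hs p.2.1 hh
      rw [hgp.2.1] at this; simp at this
    simp only [pvFold, List.foldl_cons, hstep]
    apply ih (fun q hq => hg q (by simp [hq]))
    intro x hx
    rcases pvRep_head p.1 p.2.1 p.2.2 s with hh | hh
    · exact hs x (hh ▸ hx)
    · rw [hx] at hh; cases Option.some.inj hh; exact hgp.2.2.2
-- (the symbol ▸ above rewrites with the head?-equation)

-- a non-matching vowel+digit prefix (key ≠ (c,d)) passes through untouched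
lemma pvFold_c4 (c d : Char) (hdv : pvVowel d = false) :
    ∀ (Q : List (Char × Char × Char)), pvGood Q →
      (∀ p ∈ Q, (p.1, p.2.1) ≠ (c, d)) →
      ∀ s, pvFold Q (c :: d :: s) = c :: d :: pvFold Q s := by
  intro Q
  induction Q with
  | nil => intro _ _ s; rfl
  | cons p Q ih =>
    intro hg hk s
    have hgp := hg p (by simp)
    have hkp := hk p (by simp)
    have h1 : pvRep p.1 p.2.1 p.2.2 (c :: d :: s) = c :: pvRep p.1 p.2.1 p.2.2 (d :: s) := by
      apply pvRep_nomatch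
      intro ⟨hc, hh⟩
      simp only [List.head?] at hh
      cases Option.some.inj hh
      exact hkp (by rw [hc])
    have h2 : pvRep p.1 p.2.1 p.2.2 (d :: s) = d :: pvRep p.1 p.2.1 p.2.2 s := by
      apply pvRep_nomatch
      intro ⟨hc, _⟩
      have := hgp.1
      rw [← hc, hdv] at this
      simp at this
    simp only [pvFold, List.foldl_cons, h1, h2]
    exact ih (fun q hq => hg q (by simp [hq])) (fun q hq => hk q (by simp [hq]))
      (pvRep p.1 p.2.1 p.2.2 s)

lemma pvGood_pvP : pvGood pvP := by
  intro p hp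
  fin_cases hp <;> exact ⟨by decide, by decide, by decide, by decide⟩

lemma pvGood_sub {Q₁ Q₂ : List (Char × Char × Char)} (h : pvGood Q₂)
    (hs : ∀ p ∈ Q₁, p ∈ Q₂) : pvGood Q₁ := fun p hp => h p (hs p hp)

lemma pvDigit_not_vowel (d : Char) (h : pvToneDigit d = true) : pvVowel d = false := by
  simp only [pvToneDigit, List.mem_cons, List.not_mem_nil, or_false,
    decide_eq_true_eq] at h
  rcases h with rfl | rfl | rfl | rfl <;> decide

lemma pvMem_pvP (c d : Char) (hc : pvVowel c = true) (hd : pvToneDigit d = true) :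
    (c, d, pvToneChar c d) ∈ pvP := by
  simp only [pvVowel, List.mem_cons, List.not_mem_nil, or_false,
    decide_eq_true_eq] at hc
  simp only [pvToneDigit, List.mem_cons, List.not_mem_nil, or_false,
    decide_eq_true_eq] at hd
  rcases hc with rfl | rfl | rfl | rfl | rfl | rfl <;>
    rcases hd with rfl | rfl | rfl | rfl <;> decide

lemma pvKeys_nodup : (pvP.map (fun p => (p.1, p.2.1))).Nodup := by decide

-- the matched pair is replaced and all 24 passes continue on the tail
lemma pvFold_match (c d : Char) (hc : pvVowel c = true) (hd : pvToneDigit d = true)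
    (s : List Char) : pvFold pvP (c :: d :: s) = pvToneChar c d :: pvFold pvP s := by
  obtain ⟨P1, P2, hsplit⟩ := List.append_of_mem (pvMem_pvP c d hc hd)
  have hg1 : pvGood P1 := pvGood_sub pvGood_pvP (by intro p hp; rw [hsplit]; simp [hp])
  have hg2 : pvGood P2 := pvGood_sub pvGood_pvP (by intro p hp; rw [hsplit]; simp [hp])
  have hz : pvVowel (pvToneChar c d) = false :=
    (pvGood_pvP _ (pvMem_pvP c d hc hd)).2.2.1
  have hnd := pvKeys_nodup
  rw [hsplit] at hnd
  simp only [List.map_append, List.map_cons] at hnd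
  have hk1 : ∀ p ∈ P1, (p.1, p.2.1) ≠ (c, d) := by
    intro p hp heq
    have hdisj := (List.nodup_append.mp hnd).2.2
    have hm1 : (p.1, p.2.1) ∈ P1.map (fun p => (p.1, p.2.1)) := List.mem_map_of_mem hp
    rw [heq] at hm1
    exact hdisj _ hm1 _ List.mem_cons_self rfl
  have hfold : ∀ x : List Char, pvFold pvP x = pvFold P2 (pvRep c d (pvToneChar c d) (pvFold P1 x)) := by
    intro x
    simp only [pvFold, hsplit, List.foldl_append, List.foldl_cons]
  rw [hfold (c :: d :: s), hfold s]
  rw [pvFold_c4 c d (pvDigit_not_vowel d hd) P1 hg1 hk1 s]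
  rw [pvRep_match]
  apply pvFold_c1 (pvToneChar c d) P2 _ (pvRep c d (pvToneChar c d) (pvFold P1 s))
  intro p hp heq
  have := (hg2 p hp).1
  rw [heq, hz] at this
  simp at this

lemma pvFold_eq_scan : ∀ l : List Char, pvFold pvP l = pvScan l := by
  intro l
  induction l using pvScan.induct with
  | case1 => rfl
  | case2 c hc d t' hd ih =>
    rw [pvScan]
    simp only [hc, if_true, hd]
    rw [pvFold_match c d hc hd t', ih]
  | case3 c hc d t' hd ih =>
    rw [pvScan]
    have hd' : pvToneDigit d = false := by simpa using hd
    simp only [hc, if_true, hd', Bool.false_eq_true, if_false]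
    rw [pvFold_c3 c pvP pvGood_pvP (d :: t')
      (by intro x hx; cases Option.some.inj hx; exact hd'), ih]
  | case4 c hc =>
    rw [pvScan]
    simp only [hc, if_true]
    rw [pvFold_c3 c pvP pvGood_pvP [] (by intro x hx; simp at hx)]
    rfl
  | case5 c t hc ih =>
    have hc' : pvVowel c = false := by simpa using hc
    conv_rhs => rw [pvScan.eq_def]
    simp only [hc', Bool.false_eq_true, if_false]
    have : ∀ p ∈ pvP, p.1 ≠ c := by
      intro p hp heq
      have := (pvGood_pvP p hp).1
      rw [heq, hc'] at this
      simp at this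
    rw [pvFold_c1 c pvP this t, ih]

-- A at the character level: the string fold computes pvFold pvP
lemma pvPortA_toList (text : String) : (pinyin2chinese text).toList = pvFold pvP text.toList := by
  have hgen : ∀ (L : List (String × String)) (s : String),
      (L.foldl (fun t p => PySem.Str.replace t p.1 p.2) s).toList =
        L.foldl (fun l p => PySem.Chars.replace l p.1.toList p.2.toList) s.toList := by
    intro L
    induction L with
    | nil => intro s; rfl
    | cons p L ih =>
      intro s
      simp only [List.foldl_cons]
      rw [ih]
      congr 1
      exact PySem.Str.toList_replace s p.1 p.2
  rw [pinyin2chinese, hgen]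
  simp only [pvToneTable, pvP, pvFold, List.foldl_cons, List.foldl_nil]
  simp only [String.reduceToList, pvReplace_eq]

-- ===== VERDICT (by name: the statement is the Claim_ definition above) =====
theorem pinyin2chinese_spec : Claim_equal_pinyin2chinese := by
  intro text _
  unfold Spec_pinyin2chinese pinyin2chinese_alt
  apply String.toList_inj.mp
  rw [pvPortA_toList, pvFold_eq_scan]
  simp
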